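-- pv_equiv track=rewrite | github.com/TheEman1can/CoatiraneAdventures | text/screens/select_char.py | create_bar
-- ===== SOURCE A (Python) =====
-- BOX_WIDTH = 13
--
-- def create_bar(left, right, middle, divider, size):
--     if size == 0:
--         return ''
--     string = ''
--     for x in range(size):
--         if x == 0:
--             string += left
--         else:
--             string += middle
--         for _ in range(BOX_WIDTH):
--             string += divider
--     return string + right
-- ===== SOURCE B (Python) =====
-- BOX_WIDTH = 13
--
-- def create_bar(left, right, middle, divider, size):
--     if size <= 0:
--         return ''
--     box = divider * BOX_WIDTH
--     return left + box + (middle + box) * (size - 1) + right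
-- ===== Notes on version B (the rewrite author's own statement) =====
-- stated objective: simpler
-- what changed: Replaces the nested character-appending loops with closed-form string multiplication: box = divider*BOX_WIDTH and (middle+box)*(size-1), joined in one concatenation.
-- outside the precondition, e.g. on create_bar('[', ']', '|', '-', -1): A returns ']', B returns ''
import Mathlib
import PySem

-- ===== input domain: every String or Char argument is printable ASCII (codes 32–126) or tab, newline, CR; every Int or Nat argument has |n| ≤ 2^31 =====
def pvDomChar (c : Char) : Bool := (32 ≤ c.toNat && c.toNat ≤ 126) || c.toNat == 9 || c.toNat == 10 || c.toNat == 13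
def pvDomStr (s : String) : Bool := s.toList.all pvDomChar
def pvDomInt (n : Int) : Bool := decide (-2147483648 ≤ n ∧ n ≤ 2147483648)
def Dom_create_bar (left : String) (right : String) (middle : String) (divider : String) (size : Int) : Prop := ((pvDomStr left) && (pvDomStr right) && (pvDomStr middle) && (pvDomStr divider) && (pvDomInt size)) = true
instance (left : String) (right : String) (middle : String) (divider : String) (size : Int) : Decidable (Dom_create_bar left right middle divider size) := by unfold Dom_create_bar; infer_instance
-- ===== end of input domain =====

-- B replaces A's nested character-appending loops with a closed-form concatenation
-- (box = divider*13, (middle+box)*(size-1)); objective: simpler.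


-- ===== PORT A =====
-- literal port of A: outer loop over range(size), inner loop appending divider 13 times
def create_bar (left : String) (right : String) (middle : String) (divider : String) (size : Int) : String :=
  if size = 0 then "" else
    let string : List Char :=
      (PySem.List.pyRange 0 size 1).foldl (fun s x =>
        let s := if x = 0 then s ++ left.toList else s ++ middle.toList
        (PySem.List.pyRange 0 13 1).foldl (fun s _ => s ++ divider.toList) s) []
    String.mk (string ++ right.toList)

-- ===== PORT B =====
-- literal port of Source B: box = divider*13; left + box + (middle+box)*(size-1) + right
def create_bar_alt (left : String) (right : String) (middle : String) (divider : String) (size : Int) : String :=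
  if size ≤ 0 then "" else
    let box := PySem.List.pyRepeat divider.toList 13
    String.mk (left.toList ++ box ++ PySem.List.pyRepeat (middle.toList ++ box) (size - 1) ++ right.toList)

-- ===== PRECONDITION & SPEC =====
-- Pre_ excludes negative size, outside the natural domain of a bar width: A there returns just
-- `right` (leftover loop state, the loop body never runs), while B naturally returns ''.
def Pre_create_bar (left : String) (right : String) (middle : String) (divider : String) (size : Int) : Prop := 0 ≤ size
instance (left : String) (right : String) (middle : String) (divider : String) (size : Int) : Decidable (Pre_create_bar left right middle divider size) := by unfold Pre_create_bar; infer_instance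

def pvWitness_create_bar : String × String × String × String × Int := ("[", "]", "+", "-", 3)

def Spec_create_bar (left : String) (right : String) (middle : String) (divider : String) (size : Int) (out : String) : Prop := out = create_bar_alt left right middle divider size
instance (left : String) (right : String) (middle : String) (divider : String) (size : Int) (out : String) : Decidable (Spec_create_bar left right middle divider size out) := by unfold Spec_create_bar; infer_instance

-- ===== CLAIM (what is proved, stated in full; the proofs are below) =====
def Claim_equal_create_bar : Prop := ∀ (left : String) (right : String) (middle : String) (divider : String) (size : Int), Dom_create_bar left right middle divider size → Pre_create_bar left right middle divider size → Spec_create_bar left right middle divider size (create_bar left right middle divider size)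

-- ===== LEMMAS AND PROOFS =====

-- the inner loop appends divider 13 times
theorem pvInner (D s : List Char) :
    (PySem.List.pyRange 0 13 1).foldl (fun s _ => s ++ D) s
      = s ++ (List.replicate 13 D).flatten := by
  rw [show PySem.List.pyRange 0 13 1 = [0,1,2,3,4,5,6,7,8,9,10,11,12] from by decide]
  simp [List.foldl, List.replicate, List.append_assoc]

-- the tail of the outer loop (indices ≥ 1) appends (middle ++ box) once per step
theorem pvTail (L M D : List Char) (k : Nat) : ∀ (a : Int) (s : List Char), 1 ≤ a →
    (PySem.List.pyRange a (a + k) 1).foldl (fun s x =>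
        let s := if x = 0 then s ++ L else s ++ M
        (PySem.List.pyRange 0 13 1).foldl (fun s _ => s ++ D) s) s
      = s ++ (List.replicate k (M ++ (List.replicate 13 D).flatten)).flatten := by
  induction k with
  | zero =>
    intro a s _
    rw [show a + ((0:Nat):Int) = a from by simp, PySem.List.pyRange_one_eq_nil le_rfl]
    simp
  | succ k ih =>
    intro a s ha
    rw [PySem.List.pyRange_one_cons (by omega : a < a + (k + 1 : Nat))]
    simp only [List.foldl_cons]
    have hx : (a = 0) = False := by simp; omega
    simp only [hx, if_false]
    rw [pvInner]
    have : a + ((k : Nat) + 1 : Nat) = (a + 1) + (k : Nat) := by push_cast; ring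
    rw [this, ih (a + 1) _ (by omega)]
    simp [List.replicate_succ, List.append_assoc]

theorem create_bar_spec : Claim_equal_create_bar := by
  intro left right middle divider size _ hpre
  unfold Spec_create_bar create_bar create_bar_alt
  rcases eq_or_lt_of_le (hpre : (0:Int) ≤ size) with h0 | hpos
  · simp [← h0]
  · rw [if_neg (by omega), if_neg (by omega)]
    obtain ⟨k, hk⟩ : ∃ k : Nat, size = (k : Int) + 1 := ⟨(size - 1).toNat, by omega⟩
    subst hk
    rw [show PySem.List.pyRange 0 ((k:Int)+1) 1 = 0 :: PySem.List.pyRange 1 ((k:Int)+1) 1 from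
          PySem.List.pyRange_one_cons (by omega),
        show ((k:Int)+1) = (1 + (k:Int)) from by ring]
    simp only [List.foldl_cons]
    rw [pvTail left.toList middle.toList divider.toList k 1 _ le_rfl]
    rw [pvInner]
    simp [PySem.List.pyRepeat, List.append_assoc]
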